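-- pv_equiv track=rewrite | github.com/NishimotoRyoma/unsupervised | Datatok1/Pyscript/clustCV.py | clustDistProb
-- ===== SOURCE A (Python) =====
-- def clustDistProb(cluster_resList):
--   #learnDataの出力を入力することで、クラスタリング距離を計算する
--   lenc3=len(cluster_resList[0])
--   temp3=0
--   for i in range(lenc3):
--     for j in range(lenc3):
--       temp1 = int(cluster_resList[0][i]==cluster_resList[0][j])
--       temp2 = int(cluster_resList[1][i]==cluster_resList[1][j])
--       temp3 = temp3 + int((temp1+temp2)==1)
--   return(temp3)
-- ===== SOURCE B (Python) =====
-- def clustDistProb(cluster_resList):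
--   # O(n) re-implementation: count multiplicities of labels and label pairs
--   # with hash maps; pairs with exactly one match = SA + SB - 2*SAB.
--   a = cluster_resList[0]
--   b = cluster_resList[1][:len(a)]
--   ca = {}
--   for x in a:
--     ca[x] = ca.get(x, 0) + 1
--   cb = {}
--   for y in b:
--     cb[y] = cb.get(y, 0) + 1
--   cab = {}
--   for p in zip(a, b):
--     cab[p] = cab.get(p, 0) + 1
--   sa = sum(v * v for v in ca.values())
--   sb = sum(v * v for v in cb.values())
--   sab = sum(v * v for v in cab.values())
--   return sa + sb - 2 * sab
-- ===== Notes on version B (the rewrite author's own statement) =====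
-- stated objective: faster
-- what changed: Replaces the O(n^2) double loop over index pairs by one O(n) pass building hash-map multiplicities of first labels, second labels and label pairs, combining them as SA+SB-2*SAB.
-- outside the precondition, e.g. on clustDistProb([[]]): A returns 0, B raises IndexError
import Mathlib
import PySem

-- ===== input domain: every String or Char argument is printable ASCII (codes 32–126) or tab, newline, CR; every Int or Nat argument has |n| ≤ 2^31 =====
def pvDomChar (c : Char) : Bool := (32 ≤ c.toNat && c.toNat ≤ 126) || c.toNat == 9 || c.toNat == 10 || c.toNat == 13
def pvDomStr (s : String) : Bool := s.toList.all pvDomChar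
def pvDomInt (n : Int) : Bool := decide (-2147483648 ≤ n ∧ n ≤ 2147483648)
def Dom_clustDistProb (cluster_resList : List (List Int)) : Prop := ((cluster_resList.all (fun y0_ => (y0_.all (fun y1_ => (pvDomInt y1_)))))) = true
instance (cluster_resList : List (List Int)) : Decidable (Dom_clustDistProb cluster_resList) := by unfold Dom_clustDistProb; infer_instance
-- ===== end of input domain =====

-- B replaces A's nested double loop over index pairs by one linear pass building hash-map
-- multiplicities of first labels, second labels and label pairs, returning SA+SB-2*SAB.

-- ===== PORT A =====
def clustDistProb (cluster_resList : List (List Int)) : Int :=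
  let lenc3 : Int := (PySem.List.pyGetD cluster_resList 0 []).length
  (PySem.List.pyRange 0 lenc3 1).foldl (fun temp3 i =>
    (PySem.List.pyRange 0 lenc3 1).foldl (fun temp3 j =>
      let temp1 : Int := if PySem.List.pyGetD (PySem.List.pyGetD cluster_resList 0 []) i 0
                            = PySem.List.pyGetD (PySem.List.pyGetD cluster_resList 0 []) j 0 then 1 else 0
      let temp2 : Int := if PySem.List.pyGetD (PySem.List.pyGetD cluster_resList 1 []) i 0
                            = PySem.List.pyGetD (PySem.List.pyGetD cluster_resList 1 []) j 0 then 1 else 0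
      temp3 + (if temp1 + temp2 = 1 then (1 : Int) else 0)) temp3) 0

-- ===== PORT B =====
def clustDistProb_alt (cluster_resList : List (List Int)) : Int :=
  let a := PySem.List.pyGetD cluster_resList 0 []
  let b := PySem.List.slice (PySem.List.pyGetD cluster_resList 1 []) none (some (a.length : Int))
  let ca := a.foldl (fun d x => d.insert x (d.getD x 0 + 1)) PySem.Dict.empty
  let cb := b.foldl (fun d y => d.insert y (d.getD y 0 + 1)) PySem.Dict.empty
  let cab := (a.zip b).foldl (fun d p => d.insert p (d.getD p 0 + 1)) PySem.Dict.empty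
  let sa := (ca.values.map (fun v => v * v)).sum
  let sb := (cb.values.map (fun v => v * v)).sum
  let sab := (cab.values.map (fun v => v * v)).sum
  sa + sb - 2 * sab

-- ===== PRECONDITION & SPEC =====
-- Pre_ excludes the inputs on which A raises IndexError (fewer than two label lists with a
-- nonempty first list, or a second list shorter than the first) and additionally the degenerate
-- inputs holding exactly one list, which is empty, where A's returned 0 is an accident of the loop never
-- touching cluster_resList[1] while B (naturally) indexes it and raises.
def Pre_clustDistProb (cluster_resList : List (List Int)) : Prop :=
  2 ≤ cluster_resList.length ∧
  (cluster_resList.getD 0 []).length ≤ (cluster_resList.getD 1 []).length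
instance (cluster_resList : List (List Int)) : Decidable (Pre_clustDistProb cluster_resList) := by unfold Pre_clustDistProb; infer_instance
def pvWitness_clustDistProb : List (List Int) := [[1, 2, 1], [1, 1, 2]]
def Spec_clustDistProb (cluster_resList : List (List Int)) (out : Int) : Prop := out = clustDistProb_alt cluster_resList
instance (cluster_resList : List (List Int)) (out : Int) : Decidable (Spec_clustDistProb cluster_resList out) := by unfold Spec_clustDistProb; infer_instance

-- ===== CLAIM (what is proved, stated in full; the proofs are below) =====
def Claim_equal_clustDistProb : Prop := ∀ (cluster_resList : List (List Int)), Dom_clustDistProb cluster_resList → Pre_clustDistProb cluster_resList → Spec_clustDistProb cluster_resList (clustDistProb cluster_resList)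

-- ===== LEMMAS AND PROOFS =====

-- Double sum of a weight over all ordered pairs of elements of P.
def pvDSum (P : List (Int × Int)) (w : Int × Int → Int × Int → Int) : Int :=
  (P.map (fun p => (P.map (fun q => w p q)).sum)).sum

-- The three weights: first labels match, second labels match, both match.
def pvW1 (p q : Int × Int) : Int := if p.1 = q.1 then 1 else 0
def pvW2 (p q : Int × Int) : Int := if p.2 = q.2 then 1 else 0
def pvW12 (p q : Int × Int) : Int := if p = q then 1 else 0

-- count as a 0/1 indicator sum
theorem pv_sum_ite_eq_count {γ : Type} [DecidableEq γ] (l : List γ) (x : γ) :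
    (l.map (fun q => if x = q then (1 : Int) else 0)).sum = l.count x := by
  have h := PySem.List.sum_map_ite_one_zero (fun q => decide (x = q)) l
  simp only [decide_eq_true_eq] at h
  rw [h]
  congr 1
  rw [List.count_eq_countP']
  apply List.countP_congr
  intro q _
  simp only [beq_iff_eq, decide_eq_true_eq]
  exact eq_comm

-- the two lawful BEq instances in scope count alike
theorem pv_count_inst {γ : Type} [BEq γ] [LawfulBEq γ] [DecidableEq γ] (l : List γ) (x : γ) :
    l.count x = @List.count γ instBEqOfDecidableEq x l := by
  induction l with
  | nil => rfl
  | cons a t ih => simp [List.count_cons, ih]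

-- Σ over a counter's values of v² equals the number of ordered equal pairs of the list
theorem pv_sumsq_counter {γ : Type} [BEq γ] [LawfulBEq γ] [DecidableEq γ] (l : List γ) :
    (((PySem.Dict.counter l).values).map (fun v => v * v)).sum
      = (l.map (fun p => (l.map (fun q => if p = q then (1 : Int) else 0)).sum)).sum := by
  have hv : (PySem.Dict.counter l).values
      = (PySem.Set.ofList l : List γ).map (fun k => (l.count k : Int)) := by
    show ((PySem.Dict.counter l).items).map Prod.snd = _
    rw [PySem.Dict.items_counter, List.map_map]
    rfl
  have hv2 : (PySem.Dict.counter l).values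
      = (PySem.Set.ofList l : List γ).map
          (fun k => ((@List.count γ instBEqOfDecidableEq k l : Nat) : Int)) := by
    rw [hv]
    apply List.map_congr_left
    intro k _
    rw [pv_count_inst]
  rw [hv2, List.map_map]
  have hfin : ((PySem.Set.ofList l : List γ)).toFinset = l.toFinset := by
    apply Finset.ext
    intro k
    simp [PySem.Set.mem_ofList]
  calc ((PySem.Set.ofList l : List γ).map
          ((fun v => v * v) ∘ fun k => ((@List.count γ instBEqOfDecidableEq k l : Nat) : Int))).sum
      = ((PySem.Set.ofList l : List γ)).toFinset.sum
          (fun k => ((@List.count γ instBEqOfDecidableEq k l : Nat) : Int)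
            * ((@List.count γ instBEqOfDecidableEq k l : Nat) : Int)) := by
        rw [List.sum_toFinset _ (PySem.Set.nodup_ofList l)]
        rfl
    _ = l.toFinset.sum (fun k => ((@List.count γ instBEqOfDecidableEq k l : Nat) : Int)
            * ((@List.count γ instBEqOfDecidableEq k l : Nat) : Int)) := by rw [hfin]
    _ = (l.map (fun p => ((@List.count γ instBEqOfDecidableEq p l : Nat) : Int))).sum := by
        rw [Finset.sum_list_map_count l
          (fun p => ((@List.count γ instBEqOfDecidableEq p l : Nat) : Int))]
        apply Finset.sum_congr rfl
        intro m _
        rw [nsmul_eq_mul]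
    _ = (l.map (fun p => (l.map (fun q => if p = q then (1 : Int) else 0)).sum)).sum := by
        congr 1
        apply List.map_congr_left
        intro p _
        rw [pv_sum_ite_eq_count]

-- index list of A's loops, rewritten to pairs
theorem pv_range_pairs (c0 c1 : List Int) (hn : c0.length ≤ c1.length) :
    (List.range c0.length).map (fun k => (c0.getD k 0, c1.getD k 0))
      = c0.zip (c1.take c0.length) := by
  have h0 : (List.range c0.length).map (fun k => c0.getD k 0) = c0 := by
    apply List.ext_getElem
    · simp
    · intro i h1 h2
      simp only [List.getElem_map, List.getElem_range]
      rw [List.getD_eq_getElem?_getD, List.getElem?_eq_getElem (by simpa using h1)]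
      rfl
  have h1 : (List.range c0.length).map (fun k => c1.getD k 0) = c1.take c0.length := by
    apply List.ext_getElem
    · simp; omega
    · intro i hi1 hi2
      simp only [List.getElem_map, List.getElem_range, List.getElem_take]
      have hi : i < c1.length := by simp at hi1; omega
      rw [List.getD_eq_getElem?_getD, List.getElem?_eq_getElem hi]
      rfl
  calc (List.range c0.length).map (fun k => (c0.getD k 0, c1.getD k 0))
      = ((List.range c0.length).map (fun k => c0.getD k 0)).zip
          ((List.range c0.length).map (fun k => c1.getD k 0)) := List.zip_map'.symm
    _ = c0.zip (c1.take c0.length) := by rw [h0, h1]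

-- a nested accumulator double loop is a double sum
theorem pv_double_foldl (I : List Int) (F : Int → Int → Int) :
    I.foldl (fun t i => I.foldl (fun t j => t + F i j) t) 0
      = (I.map (fun i => (I.map (F i)).sum)).sum := by
  have h1 : (fun (t : Int) (i : Int) => I.foldl (fun t j => t + F i j) t)
      = fun t i => t + (I.map (F i)).sum := by
    funext t i
    exact PySem.List.foldl_add I (F i) t
  rw [h1, PySem.List.foldl_add I (fun i => (I.map (F i)).sum) 0]
  omega

-- A's nested loops as a double sum over the zipped pairs
theorem pv_loops_as_dsum (c0 c1 : List Int) (hn : c0.length ≤ c1.length) :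
    (PySem.List.pyRange 0 (c0.length : Int) 1).foldl (fun temp3 i =>
      (PySem.List.pyRange 0 (c0.length : Int) 1).foldl (fun temp3 j =>
        temp3 + (if (if PySem.List.pyGetD c0 i 0 = PySem.List.pyGetD c0 j 0 then (1 : Int) else 0)
                    + (if PySem.List.pyGetD c1 i 0 = PySem.List.pyGetD c1 j 0 then (1 : Int) else 0)
                    = 1 then (1 : Int) else 0)) temp3) 0
      = pvDSum (c0.zip (c1.take c0.length))
          (fun p q => if pvW1 p q + pvW2 p q = 1 then (1 : Int) else 0) := by
  rw [pv_double_foldl (PySem.List.pyRange 0 (c0.length : Int) 1)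
      (fun i j => if (if PySem.List.pyGetD c0 i 0 = PySem.List.pyGetD c0 j 0 then (1 : Int) else 0)
                     + (if PySem.List.pyGetD c1 i 0 = PySem.List.pyGetD c1 j 0 then (1 : Int) else 0)
                     = 1 then (1 : Int) else 0)]
  rw [PySem.List.pyRange_zero_nat c0.length]
  rw [← pv_range_pairs c0 c1 hn]
  unfold pvDSum pvW1 pvW2
  simp [List.map_map, Function.comp_def, PySem.List.pyGetD_natCast]

-- exactly-one-match indicator decomposes pointwise
theorem pv_point (p q : Int × Int) :
    (if pvW1 p q + pvW2 p q = 1 then (1 : Int) else 0)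
      = pvW1 p q + (pvW2 p q + (-2) * pvW12 p q) := by
  unfold pvW1 pvW2 pvW12
  by_cases h1 : p.1 = q.1 <;> by_cases h2 : p.2 = q.2 <;>
    simp [h1, h2, Prod.ext_iff]

-- the decomposition lifted to double sums
theorem pv_dsum_split (P : List (Int × Int)) :
    pvDSum P (fun p q => if pvW1 p q + pvW2 p q = 1 then (1 : Int) else 0)
      = pvDSum P pvW1 + pvDSum P pvW2 - 2 * pvDSum P pvW12 := by
  unfold pvDSum
  have hinner : ∀ p, (P.map (fun q =>
        if pvW1 p q + pvW2 p q = 1 then (1 : Int) else 0)).sum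
      = (P.map (pvW1 p)).sum + ((P.map (pvW2 p)).sum + (-2) * (P.map (pvW12 p)).sum) := by
    intro p
    have : (P.map (fun q => if pvW1 p q + pvW2 p q = 1 then (1 : Int) else 0))
        = (P.map (fun q => pvW1 p q + (pvW2 p q + (-2) * pvW12 p q))) := by
      apply List.map_congr_left
      intro q _
      exact pv_point p q
    rw [this, PySem.List.sum_map_add_int]
    congr 1
    rw [PySem.List.sum_map_add_int]
    congr 1
    exact List.sum_map_mul_left P (pvW12 p) (-2)
  have houter : (P.map (fun p => (P.map (fun q =>
        if pvW1 p q + pvW2 p q = 1 then (1 : Int) else 0)).sum))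
      = (P.map (fun p => (P.map (pvW1 p)).sum
          + ((P.map (pvW2 p)).sum + (-2) * (P.map (pvW12 p)).sum))) := by
    apply List.map_congr_left
    intro p _
    exact hinner p
  rw [houter, PySem.List.sum_map_add_int, PySem.List.sum_map_add_int,
    List.sum_map_mul_left]
  ring

-- B's three sums as double sums over the zipped pairs
theorem pv_sa_eq (c0 c1 : List Int) (hn : c0.length ≤ c1.length) :
    (c0.map (fun p => (c0.map (fun q => if p = q then (1 : Int) else 0)).sum)).sum
      = pvDSum (c0.zip (c1.take c0.length)) pvW1 := by
  have hfst : (c0.zip (c1.take c0.length)).map Prod.fst = c0 :=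
    List.map_fst_zip (by simp [List.length_take]; omega)
  conv_lhs => rw [← hfst]
  unfold pvDSum pvW1
  simp [List.map_map, Function.comp_def]

theorem pv_sb_eq (c0 c1 : List Int) :
    ((c1.take c0.length).map (fun p =>
      ((c1.take c0.length).map (fun q => if p = q then (1 : Int) else 0)).sum)).sum
      = pvDSum (c0.zip (c1.take c0.length)) pvW2 := by
  have hsnd : (c0.zip (c1.take c0.length)).map Prod.snd = c1.take c0.length :=
    List.map_snd_zip (by simp [List.length_take])
  conv_lhs => rw [← hsnd]
  unfold pvDSum pvW2
  simp [List.map_map, Function.comp_def]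

-- ===== VERDICT (by name: the statement is the Claim_ definition above) =====
theorem clustDistProb_spec : Claim_equal_clustDistProb := by
  intro L _ hpre
  obtain ⟨h2, hlen⟩ := hpre
  show clustDistProb L = clustDistProb_alt L
  have hg0 : PySem.List.pyGetD L 0 [] = L.getD 0 [] := PySem.List.pyGetD_zero L []
  have hg1 : PySem.List.pyGetD L 1 [] = L.getD 1 [] := PySem.List.pyGetD_ofNat' L 1 []
  set c0 := L.getD 0 [] with hc0
  set c1 := L.getD 1 [] with hc1
  have hslice : PySem.List.slice c1 none (some (c0.length : Int)) = c1.take c0.length :=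
    PySem.List.slice_to_natCast c1 c0.length
  set P := c0.zip (c1.take c0.length) with hP
  have hA : clustDistProb L
      = pvDSum P (fun p q => if pvW1 p q + pvW2 p q = 1 then (1 : Int) else 0) := by
    simp only [clustDistProb, hg0, hg1]
    exact pv_loops_as_dsum c0 c1 hlen
  have hB : clustDistProb_alt L = pvDSum P pvW1 + pvDSum P pvW2 - 2 * pvDSum P pvW12 := by
    simp only [clustDistProb_alt, hg0, hg1, hslice,
      PySem.Dict.foldl_insert_getD_add_one_eq_counter]
    rw [pv_sumsq_counter c0, pv_sumsq_counter (c1.take c0.length), pv_sumsq_counter P]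
    rw [pv_sa_eq c0 c1 hlen, pv_sb_eq c0 c1]
    have h12 : (P.map (fun p => (P.map (fun q => if p = q then (1 : Int) else 0)).sum)).sum
        = pvDSum P pvW12 := rfl
    rw [h12]
  rw [hA, hB, pv_dsum_split]
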